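-- pv_equiv track=rewrite | github.com/Cool-Agrawal/DSA | 1374-generate-a-string-with-characters-that-have-odd-counts/1374-generate-a-string-with-characters-that-have-odd-counts.py | generateTheString
-- ===== SOURCE A (Python) =====
-- def generateTheString(n: int) -> str:
--     a = 97
--     s = ''
--     for i in range(n,-1,-1):
--         if i%2 !=  0:
--             while n>=i:
--                 s += chr(a)*i
--                 n -= i
--                 a += 1
--     return s
-- ===== SOURCE B (Python) =====
-- def generateTheString(n: int) -> str:
--     if n <= 0:
--         return ''
--     if n % 2 == 1:
--         return 'a' * n
--     return 'a' * (n - 1) + 'b'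
-- ===== Notes on version B (the rewrite author's own statement) =====
-- stated objective: simpler
-- what changed: Replaced the countdown loop with its nested while by a direct closed form on the parity of n: empty for nonpositive n, 'a'*n for odd n, 'a'*(n-1)+'b' for even n.
import Mathlib
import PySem

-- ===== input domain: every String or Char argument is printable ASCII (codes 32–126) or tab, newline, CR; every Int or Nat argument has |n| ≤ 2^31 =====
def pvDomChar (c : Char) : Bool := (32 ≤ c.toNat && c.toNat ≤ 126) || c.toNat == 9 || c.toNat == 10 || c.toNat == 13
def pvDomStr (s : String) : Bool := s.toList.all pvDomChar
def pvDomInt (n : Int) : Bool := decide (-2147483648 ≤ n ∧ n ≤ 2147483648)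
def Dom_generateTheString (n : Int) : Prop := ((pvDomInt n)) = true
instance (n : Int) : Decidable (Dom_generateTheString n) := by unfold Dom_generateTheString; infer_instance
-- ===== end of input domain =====

-- B replaces A's countdown loop (with an inner while) by a closed form on the parity of n; objective: simpler.

-- ===== PORT A =====
-- inner 'while n>=i: s += chr(a)*i; n -= i; a += 1'.  The '1 ≤ i' conjunct is a
-- pure totality guard: in A the loop body is only reached with i odd, i ≥ 0, where
-- it is always true (for i ≤ 0 ∧ n ≥ i Python would diverge).
def gWhile (i : Int) (n : Int) (a : Int) (s : List Char) : Int × Int × List Char :=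
  if h : i ≤ n ∧ 1 ≤ i then
    gWhile i (n - i) (a + 1) (s ++ List.replicate i.toNat (Char.ofNat a.toNat))
  else (n, a, s)
termination_by n.toNat
decreasing_by
  have h1 := h.1; have h2 := h.2
  omega

def generateTheString (n : Int) : String :=
  let st := (PySem.List.pyRange n (-1) (-1)).foldl
    (fun (st : Int × Int × List Char) i =>
      if PySem.Int.mod i 2 ≠ 0 then gWhile i st.1 st.2.1 st.2.2 else st)
    (n, 97, [])
  String.mk st.2.2

-- ===== PORT B =====
def generateTheString_alt (n : Int) : String :=
  if n ≤ 0 then ""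
  else if PySem.Int.mod n 2 = 1 then String.mk (List.replicate n.toNat 'a')
  else String.mk (List.replicate (n - 1).toNat 'a' ++ ['b'])

-- ===== PRECONDITION & SPEC =====
def Spec_generateTheString (n : Int) (out : String) : Prop := out = generateTheString_alt n
instance (n : Int) (out : String) : Decidable (Spec_generateTheString n out) := by unfold Spec_generateTheString; infer_instance

-- ===== CLAIM (what is proved, stated in full; the proofs are below) =====
def Claim_equal_generateTheString : Prop := ∀ (n : Int), Dom_generateTheString n → Spec_generateTheString n (generateTheString n)

-- ===== LEMMAS AND PROOFS =====

-- the loop body of A's 'for'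
def gStep (st : Int × Int × List Char) (i : Int) : Int × Int × List Char :=
  if PySem.Int.mod i 2 ≠ 0 then gWhile i st.1 st.2.1 st.2.2 else st

theorem gWhile_stop (i n a : Int) (s : List Char)
    (h : ¬ (i ≤ n ∧ 1 ≤ i)) : gWhile i n a s = (n, a, s) := by
  rw [gWhile]; simp [h]

theorem gWhile_go (i n a : Int) (s : List Char)
    (h : i ≤ n ∧ 1 ≤ i) :
    gWhile i n a s = gWhile i (n - i) (a + 1) (s ++ List.replicate i.toNat (Char.ofNat a.toNat)) := by
  rw [gWhile]; simp [h]

-- with the running n at 0, every remaining iteration is a no-op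
theorem gStep_zero (a : Int) (s : List Char) (i : Int) :
    gStep (0, a, s) i = (0, a, s) := by
  unfold gStep
  split
  · exact gWhile_stop i 0 a s (by omega)
  · rfl

theorem foldl_gStep_zero (L : List Int) (a : Int) (s : List Char) :
    L.foldl gStep (0, a, s) = (0, a, s) := by
  induction L with
  | nil => rfl
  | cons x xs ih => simpa [gStep_zero] using ih

-- with the running n at 1, folding the countdown m, m-1, …, 0 (m ≥ 1) fires exactly at i = 1
theorem foldl_gStep_one_aux (k : Nat) : ∀ (m : Int), m.toNat = k → 1 ≤ m → ∀ (a : Int) (s : List Char),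
    (PySem.List.pyRange m (-1) (-1)).foldl gStep (1, a, s)
      = (0, a + 1, s ++ [Char.ofNat a.toNat]) := by
  induction k with
  | zero => intro m hk hm; omega
  | succ k ih =>
    intro m hk hm a s
    rw [PySem.List.pyRange_neg_one_cons (by omega : (-1 : Int) < m), List.foldl_cons]
    by_cases h1 : m = 1
    · subst h1
      have hfire : gStep (1, a, s) 1 = (0, a + 1, s ++ [Char.ofNat a.toNat]) := by
        unfold gStep
        rw [if_pos (by decide), gWhile_go 1 1 a s ⟨le_refl 1, le_refl 1⟩,
            gWhile_stop 1 (1 - 1) (a + 1) _ (by omega)]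
        norm_num [List.replicate]
      rw [hfire, foldl_gStep_zero]
    · have hskip : gStep (1, a, s) m = (1, a, s) := by
        unfold gStep
        split
        · exact gWhile_stop m 1 a s (by omega)
        · rfl
      rw [hskip]
      exact ih (m - 1) (by omega) (by omega) a s

theorem foldl_gStep_one (m : Int) (hm : 1 ≤ m) (a : Int) (s : List Char) :
    (PySem.List.pyRange m (-1) (-1)).foldl gStep (1, a, s)
      = (0, a + 1, s ++ [Char.ofNat a.toNat]) :=
  foldl_gStep_one_aux m.toNat m rfl hm a s

-- for odd n ≥ 1 the very first iteration consumes everything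
theorem A_odd (n : Int) (h1 : 1 ≤ n) (h2 : PySem.Int.mod n 2 = 1) :
    generateTheString n = String.mk (List.replicate n.toNat 'a') := by
  unfold generateTheString
  show String.mk ((PySem.List.pyRange n (-1) (-1)).foldl gStep (n, 97, [])).2.2 = _
  rw [PySem.List.pyRange_neg_one_cons (by omega : (-1 : Int) < n), List.foldl_cons]
  have hstep : gStep (n, 97, ([] : List Char)) n
      = (0, 98, List.replicate n.toNat 'a') := by
    unfold gStep
    rw [if_pos (by rw [h2]; decide), gWhile_go n n 97 [] ⟨le_refl n, h1⟩,
        gWhile_stop n (n - n) (97 + 1) _ (by omega)]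
    have hc : Char.ofNat (Int.toNat 97) = 'a' := by decide
    norm_num [hc]
  rw [hstep, foldl_gStep_zero]

-- for even n ≥ 2: skip i = n, fire once at i = n-1, then fire at i = 1
theorem A_even (n : Int) (h1 : 2 ≤ n) (h2 : PySem.Int.mod n 2 = 0) :
    generateTheString n = String.mk (List.replicate (n - 1).toNat 'a' ++ ['b']) := by
  unfold generateTheString
  show String.mk ((PySem.List.pyRange n (-1) (-1)).foldl gStep (n, 97, [])).2.2 = _
  rw [PySem.List.pyRange_neg_one_cons (by omega : (-1 : Int) < n), List.foldl_cons]
  have hskip : gStep (n, 97, ([] : List Char)) n = (n, 97, []) := by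
    unfold gStep; rw [if_neg (by simpa using h2)]
  rw [hskip,
      PySem.List.pyRange_neg_one_cons (by omega : (-1 : Int) < n - 1), List.foldl_cons]
  by_cases hn2 : n = 2
  · subst hn2
    have hstep : gStep ((2 : Int), 97, ([] : List Char)) (2 - 1)
        = (0, 99, ['a', 'b']) := by
      unfold gStep
      rw [if_pos (by decide), gWhile_go (2 - 1) 2 97 [] (by constructor <;> omega),
          gWhile_go (2 - 1) (2 - (2 - 1)) (97 + 1) _ (by constructor <;> omega),
          gWhile_stop (2 - 1) (2 - (2 - 1) - (2 - 1)) (97 + 1 + 1) _ (by omega)]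
      norm_num [List.replicate]
      decide
    rw [hstep, foldl_gStep_zero]
    decide
  · have hmE := PySem.Int.mod_eq_emod_of_pos (a := n) (b := 2) (by norm_num)
    have hmE' := PySem.Int.mod_eq_emod_of_pos (a := n - 1) (b := 2) (by norm_num)
    have hodd : PySem.Int.mod (n - 1) 2 ≠ 0 := by
      rw [hmE'] ; rw [hmE] at h2; omega
    have hstep : gStep (n, 97, ([] : List Char)) (n - 1)
        = (1, 98, List.replicate (n - 1).toNat 'a') := by
      unfold gStep
      rw [if_pos hodd, gWhile_go (n - 1) n 97 [] (by constructor <;> omega),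
          gWhile_stop (n - 1) (n - (n - 1)) (97 + 1) _ (by omega)]
      have hc : Char.ofNat (Int.toNat 97) = 'a' := by decide
      norm_num [hc]
    rw [hstep, foldl_gStep_one (n - 1 - 1) (by omega) 98 _]
    have hc : Char.ofNat (Int.toNat 98) = 'b' := by decide
    rw [hc]

theorem A_nonpos (n : Int) (h : n ≤ 0) : generateTheString n = "" := by
  unfold generateTheString
  show String.mk ((PySem.List.pyRange n (-1) (-1)).foldl gStep (n, 97, [])).2.2 = _
  by_cases h0 : n = 0
  · subst h0
    rw [PySem.List.pyRange_neg_one_cons (by omega : (-1 : Int) < 0),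
        PySem.List.pyRange_neg_one_eq_nil (by omega : (0 : Int) - 1 ≤ -1)]
    have h00 : gStep ((0 : Int), 97, ([] : List Char)) 0 = (0, 97, []) := gStep_zero 97 [] 0
    simp [h00]
    rfl
  · rw [PySem.List.pyRange_neg_one_eq_nil (by omega : n ≤ -1)]
    rfl

-- ===== VERDICT (by name: the statement is the Claim_ definition above) =====
theorem generateTheString_spec : Claim_equal_generateTheString := by
  intro n _
  unfold Spec_generateTheString generateTheString_alt
  by_cases h0 : n ≤ 0
  · rw [if_pos h0, A_nonpos n h0]
  · rw [if_neg h0]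
    have hmE := PySem.Int.mod_eq_emod_of_pos (a := n) (b := 2) (by norm_num)
    by_cases hodd : PySem.Int.mod n 2 = 1
    · rw [if_pos hodd, A_odd n (by omega) hodd]
    · have heven : PySem.Int.mod n 2 = 0 := by rw [hmE] at hodd ⊢; omega
      rw [if_neg hodd, A_even n (by rw [hmE] at heven; omega) heven]
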